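-- pv_equiv track=rewrite | github.com/VedereArtificiala/prelucrareaimaginilor-proiect-fratiitate | Cod/ProiectNAOClient/utility.py | average_line
-- ===== SOURCE A (Python) =====
-- def average_line(lines):
--     s = 0
--     sx1 = 0
--     sx2 = 0
--     sy1 = 0
--     sy2 = 0
--     for line in lines:
--         s = s + 1
--         x1, y1, x2, y2 = line
--         sx1 = sx1 + x1
--         sx2 = sx2 + x2
--         sy1 = sy1 + y1
--         sy2 = sy2 + y2
--
--     return [sx1 // s, sy1 // s, sx2 // s, sy2 // s]
-- ===== SOURCE B (Python) =====
-- def average_line(lines):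
--     n = len(lines)
--     sx1 = sum(x1 for x1, y1, x2, y2 in lines)
--     sy1 = sum(y1 for x1, y1, x2, y2 in lines)
--     sx2 = sum(x2 for x1, y1, x2, y2 in lines)
--     sy2 = sum(y2 for x1, y1, x2, y2 in lines)
--     return [sx1 // n, sy1 // n, sx2 // n, sy2 // n]
-- ===== Notes on version B (the rewrite author's own statement) =====
-- stated objective: idiomatic
-- what changed: Replaces A's single fused accumulation loop (five manually maintained counters) with len() plus four independent sum() passes, one per coordinate.
import Mathlib
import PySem

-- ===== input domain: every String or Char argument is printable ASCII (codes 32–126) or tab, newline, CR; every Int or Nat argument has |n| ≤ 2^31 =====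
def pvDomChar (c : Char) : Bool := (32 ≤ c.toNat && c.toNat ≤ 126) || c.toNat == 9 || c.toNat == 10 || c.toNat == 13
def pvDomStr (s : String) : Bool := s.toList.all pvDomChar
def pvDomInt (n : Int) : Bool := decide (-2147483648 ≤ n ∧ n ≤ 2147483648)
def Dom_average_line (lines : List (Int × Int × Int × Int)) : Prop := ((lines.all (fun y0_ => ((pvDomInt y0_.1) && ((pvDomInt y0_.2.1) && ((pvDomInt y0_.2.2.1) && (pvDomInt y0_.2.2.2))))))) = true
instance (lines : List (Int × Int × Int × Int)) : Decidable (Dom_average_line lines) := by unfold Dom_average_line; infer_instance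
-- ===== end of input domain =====

-- B replaces A's single fused accumulation loop with len() plus four independent sum() passes (idiomatic decomposition).

-- ===== PORT A =====
-- A: one loop maintaining count s and four coordinate sums, then four floor divisions.
def average_line (lines : List (Int × Int × Int × Int)) : List Int :=
  let st := lines.foldl
    (fun (acc : Int × Int × Int × Int × Int) line =>
      let (s, sx1, sx2, sy1, sy2) := acc
      let (x1, y1, x2, y2) := line
      (s + 1, sx1 + x1, sx2 + x2, sy1 + y1, sy2 + y2))
    (0, 0, 0, 0, 0)
  let (s, sx1, sx2, sy1, sy2) := st
  [PySem.Int.floordiv sx1 s, PySem.Int.floordiv sy1 s,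
   PySem.Int.floordiv sx2 s, PySem.Int.floordiv sy2 s]

-- ===== PORT B =====
-- B: n = len(lines); four independent sums (sum of a generator ported as map+sum).
def average_line_alt (lines : List (Int × Int × Int × Int)) : List Int :=
  let n : Int := lines.length
  let sx1 := (lines.map (fun l => l.1)).sum
  let sy1 := (lines.map (fun l => l.2.1)).sum
  let sx2 := (lines.map (fun l => l.2.2.1)).sum
  let sy2 := (lines.map (fun l => l.2.2.2)).sum
  [PySem.Int.floordiv sx1 n, PySem.Int.floordiv sy1 n,
   PySem.Int.floordiv sx2 n, PySem.Int.floordiv sy2 n]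

-- ===== PRECONDITION & SPEC =====
-- Pre_ excludes only the empty list, where A (and B) raise ZeroDivisionError.
def Pre_average_line (lines : List (Int × Int × Int × Int)) : Prop := lines ≠ []
instance (lines : List (Int × Int × Int × Int)) : Decidable (Pre_average_line lines) := by unfold Pre_average_line; infer_instance
def pvWitness_average_line : (List (Int × Int × Int × Int)) := [(1, 2, 3, 4)]

def Spec_average_line (lines : List (Int × Int × Int × Int)) (out : List Int) : Prop := out = average_line_alt lines
instance (lines : List (Int × Int × Int × Int)) (out : List Int) : Decidable (Spec_average_line lines out) := by unfold Spec_average_line; infer_instance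

-- ===== CLAIM (what is proved, stated in full; the proofs are below) =====
def Claim_equal_average_line : Prop := ∀ (lines : List (Int × Int × Int × Int)), Dom_average_line lines → Pre_average_line lines → Spec_average_line lines (average_line lines)

-- ===== LEMMAS AND PROOFS =====

-- The fused fold's state equals the count and the four independent sums shifted by the initial accumulator.
theorem average_line_fold_eq (lines : List (Int × Int × Int × Int))
    (s sx1 sx2 sy1 sy2 : Int) :
    lines.foldl
      (fun (acc : Int × Int × Int × Int × Int) line =>
        let (s, sx1, sx2, sy1, sy2) := acc
        let (x1, y1, x2, y2) := line
        (s + 1, sx1 + x1, sx2 + x2, sy1 + y1, sy2 + y2))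
      (s, sx1, sx2, sy1, sy2)
    = (s + lines.length,
       sx1 + (lines.map (fun l => l.1)).sum,
       sx2 + (lines.map (fun l => l.2.2.1)).sum,
       sy1 + (lines.map (fun l => l.2.1)).sum,
       sy2 + (lines.map (fun l => l.2.2.2)).sum) := by
  induction lines generalizing s sx1 sx2 sy1 sy2 with
  | nil => simp
  | cons hd tl ih =>
    obtain ⟨x1, y1, x2, y2⟩ := hd
    simp only [List.foldl_cons, List.map_cons, List.sum_cons, List.length_cons, ih]
    push_cast
    refine Prod.ext ?_ (Prod.ext ?_ (Prod.ext ?_ (Prod.ext ?_ ?_))) <;> ring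

-- ===== VERDICT (by name: the statement is the Claim_ definition above) =====
theorem average_line_spec : Claim_equal_average_line := by
  intro lines _ _
  unfold Spec_average_line average_line average_line_alt
  simp only [average_line_fold_eq, zero_add]
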